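-- pv_equiv track=rewrite | github.com/jinxac/ds-algo | lc_previous/count-substrings-with-only-one-distinct-letter.py | spaceEfficientSolution
-- ===== SOURCE A (Python) =====
-- def spaceEfficientSolution(S):
--     count=0
--     total=0
--     pre=0
--     for i in range(len(S)):
--         if S[i]==S[pre]:
--             count+=1
--         else:
--             count=1
--         pre = i
--         total+=count
--     return total
-- ===== SOURCE B (Python) =====
-- def spaceEfficientSolution(S):
--     total = 0
--     rest = S
--     while rest:
--         c = rest[0]
--         L = 1
--         while L < len(rest) and rest[L] == c:
--             L += 1
--         total += L * (L + 1) // 2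
--         rest = rest[L:]
--     return total
-- ===== Notes on version B (the rewrite author's own statement) =====
-- stated objective: simpler
-- what changed: Replaces the per-index incremental run-length accumulation with a decomposition of S into maximal runs of one character, adding the closed-form triangular count L*(L+1)//2 per run.
import Mathlib
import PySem

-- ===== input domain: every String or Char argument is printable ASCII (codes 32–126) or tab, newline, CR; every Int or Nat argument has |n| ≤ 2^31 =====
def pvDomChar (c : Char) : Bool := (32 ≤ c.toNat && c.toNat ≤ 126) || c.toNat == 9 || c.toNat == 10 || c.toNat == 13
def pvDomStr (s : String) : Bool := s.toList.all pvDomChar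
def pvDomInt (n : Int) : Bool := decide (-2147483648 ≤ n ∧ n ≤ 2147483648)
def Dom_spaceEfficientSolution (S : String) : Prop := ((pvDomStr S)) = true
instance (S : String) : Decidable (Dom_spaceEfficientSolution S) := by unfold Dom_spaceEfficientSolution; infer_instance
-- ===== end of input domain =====

-- B replaces A's per-index incremental run counting with a decomposition into maximal
-- runs of one character, adding the closed-form triangular count L*(L+1)//2 per run.

-- ===== PORT A =====
-- the for-loop over range(len(S)) as an index recursion over the same state (count, total, pre);
-- S[i] / S[pre] via pyGetD (both indices are always in range here, so Python never raises)
def pvAGo (cs : List Char) (n i : Nat) (count total : Int) (pre : Nat) : Int :=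
  if i < n then
    let count' := if PySem.List.pyGetD cs (i : Int) ' ' == PySem.List.pyGetD cs (pre : Int) ' '
                  then count + 1 else 1
    pvAGo cs n (i + 1) count' (total + count') i
  else total
termination_by n - i

def spaceEfficientSolution (S : String) : Int :=
  pvAGo S.toList S.toList.length 0 0 0 0

-- ===== PORT B =====
-- outer while loop over the remaining suffix; the inner while-scan counting the run length L
-- is the length of the matching prefix; rest = rest[L:] is List.drop
def pvBGo (rest : List Char) : Int :=
  match rest with
  | [] => 0
  | c :: tl =>
    let L : Nat := 1 + (tl.takeWhile (fun x => x == c)).length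
    PySem.Int.floordiv ((L : Int) * ((L : Int) + 1)) 2 + pvBGo ((c :: tl).drop L)
termination_by rest.length
decreasing_by simp

def spaceEfficientSolution_alt (S : String) : Int :=
  pvBGo S.toList

-- ===== PRECONDITION & SPEC =====
def Spec_spaceEfficientSolution (S : String) (out : Int) : Prop := out = spaceEfficientSolution_alt S
instance (S : String) (out : Int) : Decidable (Spec_spaceEfficientSolution S out) := by unfold Spec_spaceEfficientSolution; infer_instance

-- ===== CLAIM (what is proved, stated in full; the proofs are below) =====
def Claim_equal_spaceEfficientSolution : Prop := ∀ (S : String), Dom_spaceEfficientSolution S → Spec_spaceEfficientSolution S (spaceEfficientSolution S)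

-- ===== LEMMAS AND PROOFS =====

-- A's loop, re-expressed structurally over the remaining suffix, carrying the previous char
def pvAList : List Char → Char → Int → Int → Int
  | [], _, _, total => total
  | x :: rest, p, count, total =>
    let count' := if x == p then count + 1 else 1
    pvAList rest x count' (total + count')

def pvTri : Nat → Int
  | 0 => 0
  | m + 1 => pvTri m + (m + 1)

lemma pvTri_ediv (m : Nat) : pvTri m = ((m : Int) * ((m : Int) + 1)) / 2 := by
  induction m with
  | zero => simp [pvTri]
  | succ k ih =>
    have h2 : ((k : Int) + 1) * (((k : Int) + 1) + 1)
        = (k : Int) * ((k : Int) + 1) + 2 * ((k : Int) + 1) := by ring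
    simp only [pvTri, ih]
    push_cast
    omega

lemma pvTri_eq (m : Nat) : pvTri m = PySem.Int.floordiv ((m : Int) * ((m : Int) + 1)) 2 := by
  rw [PySem.Int.floordiv_eq_ediv_of_pos (by omega)]
  exact pvTri_ediv m

lemma pvAGo_eq_aList (rest : List Char) :
    ∀ (front : List Char) (count total : Int) (pre : Nat)
      (h : pre < (front ++ rest).length),
      pvAGo (front ++ rest) (front ++ rest).length front.length count total pre
        = pvAList rest ((front ++ rest)[pre]) count total := by
  induction rest with
  | nil =>
    intro front count total pre h
    rw [pvAGo]
    simp [pvAList]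
  | cons x rs ih =>
    intro front count total pre h
    rw [pvAGo]
    have hi : front.length < (front ++ x :: rs).length := by simp
    have hgi : PySem.List.pyGetD (front ++ x :: rs) (front.length : Int) ' ' = x := by
      rw [PySem.List.pyGetD_natCast]
      simp [List.getD]
    have hgp : PySem.List.pyGetD (front ++ x :: rs) (pre : Int) ' '
        = (front ++ x :: rs)[pre] := by
      rw [PySem.List.pyGetD_natCast]
      simp [List.getD, List.getElem?_eq_getElem h]
    simp only [if_pos hi, hgi, hgp, pvAList]
    generalize (if (x == (front ++ x :: rs)[pre]) = true then count + 1 else 1) = c'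
    have hre : front ++ x :: rs = (front ++ [x]) ++ rs := by simp
    rw [hre, show front.length + 1 = (front ++ [x]).length by simp]
    rw [ih (front ++ [x]) c' (total + c') front.length (by simp)]
    congr 1
    simp

lemma pvAList_run : ∀ (m : Nat) (c : Char) (rest : List Char) (count total : Int),
    pvAList (List.replicate m c ++ rest) c count total
      = pvAList rest c (count + m) (total + m * count + pvTri m) := by
  intro m
  induction m with
  | zero => intro c rest count total; simp [pvTri]
  | succ k ih =>
    intro c rest count total
    rw [List.replicate_succ, List.cons_append]
    simp only [pvAList, beq_self_eq_true, if_true]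
    rw [ih]
    congr 1
    · push_cast; ring
    · simp only [pvTri]; push_cast; ring

lemma pvTakeWhile_replicate (c : Char) (l : List Char) :
    l.takeWhile (fun x => x == c) = List.replicate (l.takeWhile (fun x => x == c)).length c := by
  apply List.eq_replicate_of_mem
  intro b hb
  exact eq_of_beq (List.mem_takeWhile_imp (p := fun x => x == c) hb)

lemma pvHead_dropWhile (c : Char) (l : List Char) (y : Char) (d : List Char)
    (h : l.dropWhile (fun x => x == c) = y :: d) : (y == c) = false := by
  have hne : l.dropWhile (fun x => x == c) ≠ [] := by rw [h]; simp
  have hh := List.head_dropWhile_not (fun x => x == c) hne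
  simp only [h, List.head_cons] at hh
  exact hh

lemma pvAList_eq_bGo (n : Nat) : ∀ (x : Char) (rs : List Char) (t : Int),
    rs.length ≤ n → pvAList (x :: rs) x 0 t = t + pvBGo (x :: rs) := by
  induction n with
  | zero =>
    intro x rs t hn
    have hrs : rs = [] := by cases rs <;> simp_all
    subst hrs
    simp [pvAList, pvBGo, PySem.Int.floordiv]
  | succ n ih =>
    intro x rs t hn
    set k := (rs.takeWhile (fun y => y == x)).length with hk
    set d := rs.dropWhile (fun y => y == x) with hd
    have hsplit : x :: rs = List.replicate (k + 1) x ++ d := by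
      rw [List.replicate_succ, List.cons_append]
      congr 1
      conv_lhs => rw [← List.takeWhile_append_dropWhile (p := fun y => y == x) (l := rs)]
      rw [← hd, hk]
      congr 1
      exact pvTakeWhile_replicate x rs
    have hdrop : (x :: rs).drop (1 + k) = d := by
      rw [hsplit]
      exact List.drop_left' (by simp; omega)
    have hdlen : d.length ≤ rs.length := by
      rw [hd]; exact List.length_dropWhile_le _ _
    have hbgo : pvBGo (x :: rs) = pvTri (1 + k) + pvBGo d := by
      rw [pvBGo]
      simp only [← hk, hdrop, ← pvTri_eq]
    have hrun := pvAList_run (k + 1) x d 0 t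
    conv_lhs => rw [hsplit]
    rw [hrun]
    cases hdc : d with
    | nil =>
      simp only [pvAList]
      rw [hbgo, hdc]
      simp only [pvBGo]
      rw [show 1 + k = k + 1 by omega]
      push_cast
      ring
    | cons y d' =>
      have hy : (y == x) = false := pvHead_dropWhile x rs y d' (by rw [← hd, hdc])
      set T := t + ((k + 1 : Nat) : Int) * 0 + pvTri (k + 1) with hT
      have hstep : pvAList (y :: d') x (0 + ((k + 1 : Nat) : Int)) T
          = pvAList d' y 1 (T + 1) := by
        simp [pvAList, hy]
      have hstep2 : pvAList (y :: d') y 0 T = pvAList d' y 1 (T + 1) := by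
        simp [pvAList]
      have hih := ih y d' T (by
        have h1 : d.length ≤ n + 1 := le_trans hdlen hn
        rw [hdc] at h1; simp at h1; omega)
      rw [hdc] at hbgo
      rw [hstep, ← hstep2, hih, hbgo, hT]
      rw [show 1 + k = k + 1 by omega]
      push_cast
      ring

-- ===== VERDICT (by name: the statement is the Claim_ definition above) =====
theorem spaceEfficientSolution_spec : Claim_equal_spaceEfficientSolution := by
  intro S _
  unfold Spec_spaceEfficientSolution spaceEfficientSolution spaceEfficientSolution_alt
  cases hcs : S.toList with
  | nil => rw [pvAGo]; simp [pvBGo]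
  | cons x rs =>
    have h0 : (0 : Nat) < (([] : List Char) ++ x :: rs).length := by simp
    have h1 := pvAGo_eq_aList (x :: rs) [] 0 0 0 h0
    simp only [List.nil_append, List.length_nil] at h1
    rw [h1]
    simp only [List.getElem_cons_zero]
    rw [pvAList_eq_bGo rs.length x rs 0 (le_refl _)]
    ring
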